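-- pv_equiv track=rewrite | github.com/llnl/axom | src/axom/bump/clipping/convert_triangles.py | merge_polygons
-- ===== SOURCE A (Python) =====
-- def merge_polygons(poly1, poly2):
--     """Merge two polygons that share an edge into a larger polygon."""
--     n1, n2 = len(poly1), len(poly2)
--     # Find the shared edge
--     for i in range(n1):
--         a1, a2 = poly1[i], poly1[(i+1)%n1]
--         for j in range(n2):
--             b1, b2 = poly2[j], poly2[(j+1)%n2]
--             if {a1, a2} == {b1, b2}:
--                 # Merge poly2 into poly1 at the shared edge
--                 # Remove the shared edge from both
--                 # poly1: ... a1 a2 ...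
--                 # poly2: ... b1 b2 ...
--                 # We want: ... a2 ... a1 ... (excluding the shared edge)
--                 # Find the order to append poly2
--                 # poly1: a1 a2 ... (rest)
--                 # poly2: b2 ... (rest) b1
--                 # Remove the shared edge from both
--                 idx1 = i
--                 idx2 = j
--                 # Build new polygon
--                 new_poly = []
--                 # Add poly1 from a2 (next after shared edge) to a1 (before shared edge)
--                 k = (idx1 + 1) % n1
--                 while k != idx1:
--                     new_poly.append(poly1[k])
--                     k = (k + 1) % n1
--                 # Add poly2 from b2 (next after shared edge) to b1 (before shared edge), in reverse
--                 k = (idx2 + 1) % n2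
--                 temp = []
--                 while k != idx2:
--                     temp.append(poly2[k])
--                     k = (k + 1) % n2
--                 new_poly += temp
--                 return tuple(new_poly)
--     return None
-- ===== SOURCE B (Python) =====
-- def merge_polygons(poly1, poly2):
--     """Merge two polygons that share an edge into a larger polygon."""
--     n1, n2 = len(poly1), len(poly2)
--     # Hash every edge of poly2 (as an unordered pair) to its first index.
--     first = {}
--     for j in range(n2):
--         e = frozenset((poly2[j], poly2[(j + 1) % n2]))
--         if e not in first:
--             first[e] = j
--     # Scan poly1's edges once.
--     for i in range(n1):
--         e = frozenset((poly1[i], poly1[(i + 1) % n1]))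
--         if e in first:
--             j = first[e]
--             return tuple(poly1[i + 1:] + poly1[:i] + poly2[j + 1:] + poly2[:j])
--     return None
-- ===== Notes on version B (the rewrite author's own statement) =====
-- stated objective: faster
-- what changed: B hashes every edge of poly2 (as an unordered pair) to its first index in one pass, then scans poly1's edges once and builds the merged polygon with slices, replacing A's nested edge-by-edge scan and modular while-loops.
import Mathlib
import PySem

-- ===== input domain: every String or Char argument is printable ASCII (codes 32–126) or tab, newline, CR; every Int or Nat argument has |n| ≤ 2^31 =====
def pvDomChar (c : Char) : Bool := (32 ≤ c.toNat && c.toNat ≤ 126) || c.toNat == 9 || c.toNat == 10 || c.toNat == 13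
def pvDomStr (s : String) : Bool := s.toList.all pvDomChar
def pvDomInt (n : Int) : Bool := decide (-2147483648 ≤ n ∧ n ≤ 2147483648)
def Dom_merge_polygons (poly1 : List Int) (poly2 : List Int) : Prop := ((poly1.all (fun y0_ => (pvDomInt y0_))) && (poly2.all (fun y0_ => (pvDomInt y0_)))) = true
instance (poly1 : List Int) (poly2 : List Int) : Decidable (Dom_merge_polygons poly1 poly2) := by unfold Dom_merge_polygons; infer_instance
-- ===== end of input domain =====

-- B replaces A's nested edge-by-edge scan by a hash of poly2's edges plus one pass over poly1 (objective: faster).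


-- ===== PORT A =====
-- '{a1, a2} == {b1, b2}': Python set equality of (possibly equal) int pairs, exact as a Boolean
def mpSetEq (a1 a2 b1 b2 : Int) : Bool := (a1 == b1 && a2 == b2) || (a1 == b2 && a2 == b1)

-- the while loop 'k = (idx+1)%n; while k != idx: new.append(poly[k]); k = (k+1)%n'; fuel = n bounds its
-- ≤ n-1 iterations (k cycles through residues mod n) so the port is exact; all indices are in range (getD default unused)
def mpCollect (poly : List Int) (idx : Nat) (n : Nat) (k : Nat) (fuel : Nat) : List Int :=
  match fuel with
  | 0 => []
  | fuel + 1 =>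
    if k = idx then []
    else poly.getD k 0 :: mpCollect poly idx n ((k + 1) % n) fuel

-- inner 'for j in range(n2)' loop of A (early return = Option)
def mpInner (poly1 poly2 : List Int) (n1 n2 i : Nat) : List Nat → Option (List Int)
  | [] => none
  | j :: js =>
    let a1 := poly1.getD i 0
    let a2 := poly1.getD ((i + 1) % n1) 0
    let b1 := poly2.getD j 0
    let b2 := poly2.getD ((j + 1) % n2) 0
    if mpSetEq a1 a2 b1 b2 then
      some (mpCollect poly1 i n1 ((i + 1) % n1) n1 ++ mpCollect poly2 j n2 ((j + 1) % n2) n2)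
    else mpInner poly1 poly2 n1 n2 i js

-- outer 'for i in range(n1)' loop of A
def mpOuter (poly1 poly2 : List Int) (n1 n2 : Nat) : List Nat → Option (List Int)
  | [] => none
  | i :: is =>
    match mpInner poly1 poly2 n1 n2 i (List.range n2) with
    | some r => some r
    | none => mpOuter poly1 poly2 n1 n2 is

def merge_polygons (poly1 : List Int) (poly2 : List Int) : Option (List Int) :=
  mpOuter poly1 poly2 poly1.length poly2.length (List.range poly1.length)

-- ===== PORT B =====
-- frozenset((x, y)) used as a dict key: represented exactly by the normalized pair (min, max)
def mbKey (x y : Int) : Int × Int := (min x y, max x y)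

-- 'for j in range(n2): e = frozenset(...); if e not in first: first[e] = j'
def mbDict (poly2 : List Int) (n2 : Nat) : PySem.Dict (Int × Int) Nat :=
  (List.range n2).foldl
    (fun d j =>
      let e := mbKey (poly2.getD j 0) (poly2.getD ((j + 1) % n2) 0)
      if d.contains e then d else d.insert e j)
    PySem.Dict.empty

-- 'for i in range(n1): e = frozenset(...); if e in first: j = first[e]; return tuple(poly1[i+1:] + poly1[:i] + poly2[j+1:] + poly2[:j])'
def mbScan (poly1 poly2 : List Int) (n1 : Nat) (first : PySem.Dict (Int × Int) Nat) : List Nat → Option (List Int)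
  | [] => none
  | i :: is =>
    let e := mbKey (poly1.getD i 0) (poly1.getD ((i + 1) % n1) 0)
    match first.get? e with
    | some j =>
      some (PySem.List.slice poly1 (some ((i : Int) + 1)) none ++ PySem.List.slice poly1 none (some (i : Int)) ++
            PySem.List.slice poly2 (some ((j : Int) + 1)) none ++ PySem.List.slice poly2 none (some (j : Int)))
    | none => mbScan poly1 poly2 n1 first is

def merge_polygons_alt (poly1 : List Int) (poly2 : List Int) : Option (List Int) :=
  mbScan poly1 poly2 poly1.length (mbDict poly2 poly2.length) (List.range poly1.length)

-- ===== PRECONDITION & SPEC =====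
def Spec_merge_polygons (poly1 : List Int) (poly2 : List Int) (out : Option (List Int)) : Prop := out = merge_polygons_alt poly1 poly2
instance (poly1 : List Int) (poly2 : List Int) (out : Option (List Int)) : Decidable (Spec_merge_polygons poly1 poly2 out) := by unfold Spec_merge_polygons; infer_instance

-- ===== CLAIM (what is proved, stated in full; the proofs are below) =====
def Claim_equal_merge_polygons : Prop := ∀ (poly1 : List Int) (poly2 : List Int), Dom_merge_polygons poly1 poly2 → Spec_merge_polygons poly1 poly2 (merge_polygons poly1 poly2)

-- ===== LEMMAS AND PROOFS =====

-- A's set-equality test succeeds exactly when the normalized keys coincide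
theorem mpSetEq_iff (a1 a2 b1 b2 : Int) : mpSetEq a1 a2 b1 b2 = true ↔ mbKey b1 b2 = mbKey a1 a2 := by
  simp [mpSetEq, mbKey, Prod.ext_iff]
  omega

-- the first j in js whose poly2-edge has key e
def firstJ (poly2 : List Int) (n2 : Nat) (e : Int × Int) (js : List Nat) : Option Nat :=
  js.find? (fun j => mbKey (poly2.getD j 0) (poly2.getD ((j + 1) % n2) 0) == e)

-- B's dict-building fold: lookup = value already present, else the first matching j of the scanned list
theorem mbFold_get? (poly2 : List Int) (n2 : Nat) (e : Int × Int) (js : List Nat) (d : PySem.Dict (Int × Int) Nat) :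
    ((js.foldl (fun d j =>
        let e := mbKey (poly2.getD j 0) (poly2.getD ((j + 1) % n2) 0)
        if d.contains e then d else d.insert e j) d).get? e) =
      match d.get? e with
      | some v => some v
      | none => firstJ poly2 n2 e js := by
  induction js generalizing d with
  | nil => cases h : d.get? e <;> simp [firstJ, h]
  | cons j js ih =>
    simp only [List.foldl_cons]
    cases hc : d.contains (mbKey (poly2.getD j 0) (poly2.getD ((j + 1) % n2) 0)) with
    | true =>
      simp only [if_true]
      rw [ih]
      cases h : d.get? e with
      | some v => simp
      | none =>
        have hne : mbKey (poly2.getD j 0) (poly2.getD ((j + 1) % n2) 0) ≠ e := by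
          intro hEq
          rw [PySem.Dict.contains_eq_isSome_get?, hEq, h] at hc
          simp at hc
        have hb : (mbKey (poly2.getD j 0) (poly2.getD ((j + 1) % n2) 0) == e) = false :=
          beq_eq_false_iff_ne.mpr hne
        simp only [List.getD_eq_getElem?_getD] at hb
        simp [firstJ, hb]
    | false =>
      simp only [Bool.false_eq_true, if_false]
      rw [ih, PySem.Dict.get?_insert]
      by_cases he : e = mbKey (poly2.getD j 0) (poly2.getD ((j + 1) % n2) 0)
      · have hnone : d.get? e = none := by
          rw [PySem.Dict.contains_eq_isSome_get?, ← he] at hc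
          cases h : d.get? e <;> simp [h] at hc ⊢
        rw [he] at hnone
        simp only [List.getD_eq_getElem?_getD] at hnone
        simp [he, hnone, firstJ]
      · have hb : (mbKey (poly2.getD j 0) (poly2.getD ((j + 1) % n2) 0) == e) = false :=
          beq_eq_false_iff_ne.mpr (fun h => he h.symm)
        simp only [List.getD_eq_getElem?_getD] at hb
        simp only [if_neg he]
        cases h : d.get? e <;> simp [firstJ, hb]

-- A's while loop, second phase (k already wrapped past 0): collects poly[k..idx)
theorem mpCollect_low (poly : List Int) (idx : Nat) (hidx : idx < poly.length) :
    ∀ fuel k, k ≤ idx → idx - k ≤ fuel →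
      mpCollect poly idx poly.length k fuel = (poly.take idx).drop k := by
  intro fuel
  induction fuel with
  | zero =>
    intro k hk hf
    have : k = idx := by omega
    subst this
    simp [mpCollect]
  | succ fuel ih =>
    intro k hk hf
    by_cases hki : k = idx
    · subst hki; simp [mpCollect]
    · have hlt : k < idx := by omega
      have hmod : (k + 1) % poly.length = k + 1 := Nat.mod_eq_of_lt (by omega)
      rw [mpCollect, if_neg hki, hmod, ih (k + 1) (by omega) (by omega)]
      have hk' : k < (poly.take idx).length := by simp; omega
      conv_rhs => rw [List.drop_eq_getElem_cons hk']
      congr 1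
      rw [List.getElem_take]
      simp [List.getD_eq_getElem?_getD, List.getElem?_eq_getElem (by omega : k < poly.length)]

-- A's while loop, first phase (idx < k < n): collects poly[k..n) then wraps and collects poly[0..idx)
theorem mpCollect_high (poly : List Int) (idx : Nat) (hidx : idx < poly.length) :
    ∀ fuel k, idx < k → k < poly.length → poly.length - k + idx ≤ fuel →
      mpCollect poly idx poly.length k fuel = poly.drop k ++ poly.take idx := by
  intro fuel
  induction fuel with
  | zero => intro k h1 h2 h3; omega
  | succ fuel ih =>
    intro k h1 h2 h3
    have hki : k ≠ idx := by omega
    rw [mpCollect, if_neg hki]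
    have hget : poly[k]?.getD 0 = poly[k] := by
      simp [List.getElem?_eq_getElem h2]
    by_cases hend : k + 1 = poly.length
    · have hmod : (k + 1) % poly.length = 0 := by rw [hend]; simp
      rw [hmod, mpCollect_low poly idx hidx fuel 0 (by omega) (by omega)]
      have hdrop : poly.drop k = [poly[k]] := by
        rw [List.drop_eq_getElem_cons h2]
        simp [show k + 1 = poly.length from hend]
      simp [List.getD_eq_getElem?_getD, hget, hdrop]
    · have hmod : (k + 1) % poly.length = k + 1 := Nat.mod_eq_of_lt (by omega)
      rw [hmod, ih (k + 1) (by omega) (by omega) (by omega)]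
      rw [show poly.getD k 0 = poly[k] by rw [List.getD_eq_getElem?_getD, hget]]
      conv_rhs => rw [List.drop_eq_getElem_cons h2]
      rfl

-- the whole while loop from (idx+1)%n: the rotation of poly that omits index idx
theorem mpCollect_eq (poly : List Int) (idx : Nat) (hidx : idx < poly.length) :
    mpCollect poly idx poly.length ((idx + 1) % poly.length) poly.length =
      poly.drop (idx + 1) ++ poly.take idx := by
  by_cases hend : idx + 1 = poly.length
  · have hmod : (idx + 1) % poly.length = 0 := by rw [hend]; simp
    rw [hmod, mpCollect_low poly idx hidx poly.length 0 (by omega) (by omega)]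
    simp [show poly.length ≤ idx + 1 by omega, List.drop_eq_nil_of_le]
  · have hmod : (idx + 1) % poly.length = idx + 1 := Nat.mod_eq_of_lt (by omega)
    rw [hmod, mpCollect_high poly idx hidx poly.length (idx + 1) (by omega) (by omega) (by omega)]

-- A's inner loop = first matching j, then the merged output
theorem mpInner_eq (poly1 poly2 : List Int) (i : Nat) (js : List Nat) :
    mpInner poly1 poly2 poly1.length poly2.length i js =
      (firstJ poly2 poly2.length (mbKey (poly1.getD i 0) (poly1.getD ((i + 1) % poly1.length) 0)) js).map
        (fun j => mpCollect poly1 i poly1.length ((i + 1) % poly1.length) poly1.length ++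
                  mpCollect poly2 j poly2.length ((j + 1) % poly2.length) poly2.length) := by
  induction js with
  | nil => simp [mpInner, firstJ]
  | cons j js ih =>
    simp only [mpInner, firstJ, List.find?_cons] at *
    have hbool : mpSetEq (poly1.getD i 0) (poly1.getD ((i + 1) % poly1.length) 0)
        (poly2.getD j 0) (poly2.getD ((j + 1) % poly2.length) 0) =
        (mbKey (poly2.getD j 0) (poly2.getD ((j + 1) % poly2.length) 0) ==
          mbKey (poly1.getD i 0) (poly1.getD ((i + 1) % poly1.length) 0)) := by
      rw [Bool.eq_iff_iff, mpSetEq_iff, beq_iff_eq]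
    rw [hbool]
    cases hm : (mbKey (poly2.getD j 0) (poly2.getD ((j + 1) % poly2.length) 0) ==
        mbKey (poly1.getD i 0) (poly1.getD ((i + 1) % poly1.length) 0)) with
    | true =>
      simp
    | false =>
      simp only [List.getD_eq_getElem?_getD] at hm
      simp [ih]

-- the main loop: A's outer scan agrees with B's dict-lookup scan on any index list inside poly1
theorem main_loop (poly1 poly2 : List Int) (is : List Nat) (his : ∀ i ∈ is, i < poly1.length) :
    mpOuter poly1 poly2 poly1.length poly2.length is =
      mbScan poly1 poly2 poly1.length (mbDict poly2 poly2.length) is := by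
  induction is with
  | nil => simp [mpOuter, mbScan]
  | cons i is ih =>
    have hi : i < poly1.length := his i (List.mem_cons_self ..)
    simp only [mpOuter, mbScan, mbDict]
    rw [mpInner_eq, mbFold_get?]
    simp only [PySem.Dict.get?_empty]
    cases hfind : firstJ poly2 poly2.length
        (mbKey (poly1.getD i 0) (poly1.getD ((i + 1) % poly1.length) 0)) (List.range poly2.length) with
    | none =>
      simp only [Option.map_none]
      exact ih (fun i hm => his i (List.mem_cons_of_mem _ hm))
    | some j =>
      have hj : j < poly2.length := by
        have := List.mem_of_find?_eq_some hfind
        simpa [List.mem_range] using this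
      simp only [Option.map_some]
      rw [mpCollect_eq poly1 i hi, mpCollect_eq poly2 j hj]
      have h1 : PySem.List.slice poly1 (some ((i : Int) + 1)) none = poly1.drop (i + 1) := by
        rw [show ((i : Int) + 1) = ((i + 1 : Nat) : Int) by push_cast; ring,
          PySem.List.slice_from_natCast]
      have h2 : PySem.List.slice poly1 none (some (i : Int)) = poly1.take i :=
        PySem.List.slice_to_natCast ..
      have h3 : PySem.List.slice poly2 (some ((j : Int) + 1)) none = poly2.drop (j + 1) := by
        rw [show ((j : Int) + 1) = ((j + 1 : Nat) : Int) by push_cast; ring,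
          PySem.List.slice_from_natCast]
      have h4 : PySem.List.slice poly2 none (some (j : Int)) = poly2.take j :=
        PySem.List.slice_to_natCast ..
      rw [h1, h2, h3, h4]
      simp [List.append_assoc]

-- ===== VERDICT (by name: the statement is the Claim_ definition above) =====
theorem merge_polygons_spec : Claim_equal_merge_polygons := by
  intro poly1 poly2 _
  unfold Spec_merge_polygons merge_polygons merge_polygons_alt
  exact main_loop poly1 poly2 (List.range poly1.length) (fun i hm => List.mem_range.mp hm)
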